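-- pv_equiv track=rewrite | github.com/ignat-101/tondomaingame | tenkclub_service.py | _match_mask
-- ===== SOURCE A (Python) =====
-- def _match_mask(mask: str, number: str) -> tuple[bool, dict[str, str]]:
--     if len(mask) != len(number):
--         return False, {}
--     bindings: dict[str, str] = {}
--     for digit, token in zip(number, mask):
--         if token.isdigit():
--             if digit != token:
--                 return False, {}
--             continue
--         bound = bindings.get(token)
--         if bound is None:
--             bindings[token] = digit
--         elif bound != digit:
--             return False, {}
--     if len(set(bindings.values())) != len(bindings):
--         return False, {}
--     return True, bindings
-- ===== SOURCE B (Python) =====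
-- def _match_mask(mask: str, number: str) -> tuple[bool, dict[str, str]]:
--     if len(mask) != len(number):
--         return False, {}
--     bindings: dict[str, str] = {}
--     used: dict[str, str] = {}  # digit -> token, enforces injectivity inline
--     for digit, token in zip(number, mask):
--         if token.isdigit():
--             if digit == token:
--                 continue
--             return False, {}
--         bound = bindings.get(token)
--         if bound is None:
--             if digit in used:
--                 return False, {}
--             bindings[token] = digit
--             used[digit] = token
--         elif bound != digit:
--             return False, {}
--     return True, bindings
-- ===== Notes on version B (the rewrite author's own statement) =====
-- stated objective: alternative
-- what changed: A binds letter tokens freely and only checks injectivity of the bindings with a trailing set()-over-values pass; B carries a reverse map (digit -> token) through the single loop and rejects a fresh token reusing an already-bound digit immediately, so the trailing distinctness pass disappears.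
import Mathlib
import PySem

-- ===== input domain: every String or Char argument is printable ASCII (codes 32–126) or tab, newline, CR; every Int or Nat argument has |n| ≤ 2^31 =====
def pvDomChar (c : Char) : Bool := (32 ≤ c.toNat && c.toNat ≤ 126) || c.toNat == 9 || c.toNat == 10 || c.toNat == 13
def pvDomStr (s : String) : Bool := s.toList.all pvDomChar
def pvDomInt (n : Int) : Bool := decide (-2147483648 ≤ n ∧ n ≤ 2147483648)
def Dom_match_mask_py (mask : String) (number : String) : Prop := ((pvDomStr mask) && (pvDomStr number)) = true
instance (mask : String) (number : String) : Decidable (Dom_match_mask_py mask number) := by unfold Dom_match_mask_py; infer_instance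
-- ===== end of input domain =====

-- B replaces A's trailing set()-distinctness pass by an inline reverse map (digit → token),
-- failing immediately when a fresh token would reuse an already-bound digit (objective: alternative decomposition).

-- ===== PORT A =====
-- the for-loop of A: none = an early 'return False, {}' inside the loop
def mmLoopA : List (Char × Char) → PySem.Dict String String → Option (PySem.Dict String String)
  | [], b => some b
  | (digit, token) :: rest, b =>
    if PySem.Chars.isdigit token then
      if digit ≠ token then none
      else mmLoopA rest b
    else
      match b.get? (String.ofList [token]) with
      | none => mmLoopA rest (b.insert (String.ofList [token]) (String.ofList [digit]))
      | some bound =>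
        if bound ≠ String.ofList [digit] then none
        else mmLoopA rest b

def match_mask_py (mask : String) (number : String) : Bool × (List (String × String)) :=
  if PySem.Str.len mask ≠ PySem.Str.len number then (false, [])
  else
    match mmLoopA (number.toList.zip mask.toList) PySem.Dict.empty with
    | none => (false, [])
    | some b =>
      if (PySem.Set.ofList b.values).length ≠ b.size then (false, [])
      else (true, b.items)

-- ===== PORT B =====
-- B's loop: carries bindings b and the reverse map u (digit → token)
def mmLoopB : List (Char × Char) → PySem.Dict String String → PySem.Dict String String → Bool × (List (String × String))
  | [], b, _ => (true, b.items)
  | (digit, token) :: rest, b, u =>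
    if PySem.Chars.isdigit token then
      if digit = token then mmLoopB rest b u
      else (false, [])
    else
      match b.get? (String.ofList [token]) with
      | none =>
        match u.get? (String.ofList [digit]) with
        | some _ => (false, [])
        | none => mmLoopB rest (b.insert (String.ofList [token]) (String.ofList [digit]))
                              (u.insert (String.ofList [digit]) (String.ofList [token]))
      | some bound =>
        if bound = String.ofList [digit] then mmLoopB rest b u
        else (false, [])

def match_mask_py_alt (mask : String) (number : String) : Bool × (List (String × String)) :=
  if PySem.Str.len mask ≠ PySem.Str.len number then (false, [])
  else mmLoopB (number.toList.zip mask.toList) PySem.Dict.empty PySem.Dict.empty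

-- ===== PRECONDITION & SPEC =====
def Spec_match_mask_py (mask : String) (number : String) (out : Bool × (List (String × String))) : Prop := out = match_mask_py_alt mask number
instance (mask : String) (number : String) (out : Bool × (List (String × String))) : Decidable (Spec_match_mask_py mask number out) := by unfold Spec_match_mask_py; infer_instance

-- ===== CLAIM (what is proved, stated in full; the proofs are below) =====
def Claim_equal_match_mask_py : Prop := ∀ (mask : String) (number : String), Dom_match_mask_py mask number → Spec_match_mask_py mask number (match_mask_py mask number)

-- ===== LEMMAS AND PROOFS =====

-- u is exactly the inverse of b
def mmInv (b u : PySem.Dict String String) : Prop :=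
  (∀ k v, b.get? k = some v → u.get? v = some k) ∧
  (∀ v k, u.get? v = some k → b.get? k = some v)

theorem mm_ofList_ne_of_not_nodup {xs : List String} (h : ¬ xs.Nodup) :
    (PySem.Set.ofList xs).length ≠ xs.length := by
  have hperm : List.Perm (PySem.Set.ofList xs) xs.dedup := by
    rw [List.perm_ext_iff_of_nodup (PySem.Set.nodup_ofList xs) (List.nodup_dedup xs)]
    intro a; simp [PySem.Set.mem_ofList, List.mem_dedup]
  have hlen := hperm.length_eq
  intro hce
  have hsub : List.Sublist xs.dedup xs := List.dedup_sublist xs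
  have : xs.dedup = xs := hsub.eq_of_length (by omega)
  exact h (this ▸ List.nodup_dedup xs)

theorem mm_values_nodup {b u : PySem.Dict String String}
    (hinv : mmInv b u) (hnd : b.keys.Nodup) : b.values.Nodup := by
  have hitems : b.items.Nodup := hnd.of_map _
  refine hitems.map_on ?_
  rintro ⟨k1, v1⟩ h1 ⟨k2, v2⟩ h2 hv
  simp only at hv
  have g1 : b.get? k1 = some v1 := PySem.Dict.get?_of_mem_items _ h1 hnd
  have g2 : b.get? k2 = some v2 := PySem.Dict.get?_of_mem_items _ h2 hnd
  have u1 := hinv.1 _ _ g1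
  have u2 := hinv.1 _ _ g2
  rw [hv] at u1
  rw [u2] at u1
  cases u1
  subst hv
  rfl

-- mmLoopA never overwrites an existing entry
theorem mmLoopA_get?_mono : ∀ (pairs : List (Char × Char)) (b b' : PySem.Dict String String),
    mmLoopA pairs b = some b' → ∀ k v, b.get? k = some v → b'.get? k = some v := by
  intro pairs
  induction pairs with
  | nil => intro b b' h k v hk; simp [mmLoopA] at h; exact h ▸ hk
  | cons p rest ih =>
    obtain ⟨digit, token⟩ := p
    intro b b' h k v hk
    simp only [mmLoopA] at h
    split at h
    · split at h
      · exact absurd h (by simp)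
      · exact ih _ _ h _ _ hk
    · split at h
      · rename_i hnone
        refine ih _ _ h _ _ ?_
        rw [PySem.Dict.get?_insert]
        split
        · rename_i he; rw [he] at hk; rw [hk] at hnone; cases hnone
        · exact hk
      · split at h
        · exact absurd h (by simp)
        · exact ih _ _ h _ _ hk

-- a duplicated value survives to the end and fails A's set()-distinctness test
theorem mmLoopA_dup_false {b : PySem.Dict String String} (pairs : List (Char × Char))
    (_hnd : b.keys.Nodup) (k1 k2 : String) (v : String) (hne : k1 ≠ k2)
    (h1 : b.get? k1 = some v) (h2 : b.get? k2 = some v) :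
    (match mmLoopA pairs b with
     | none => ((false : Bool), ([] : List (String × String)))
     | some b2 => if (PySem.Set.ofList b2.values).length ≠ b2.size then (false, [])
                  else (true, b2.items)) = (false, []) := by
  cases hA : mmLoopA pairs b with
  | none => simp
  | some b2 =>
    have g1 := mmLoopA_get?_mono pairs b b2 hA k1 v h1
    have g2 := mmLoopA_get?_mono pairs b b2 hA k2 v h2
    have hnotnodup : ¬ b2.values.Nodup := by
      intro hnod
      have m1 : (k1, v) ∈ b2.items := PySem.Dict.mem_items_of_get?_eq_some _ g1
      have m2 : (k2, v) ∈ b2.items := PySem.Dict.mem_items_of_get?_eq_some _ g2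
      have : (k1, v) = (k2, v) :=
        List.inj_on_of_nodup_map hnod m1 m2 rfl
      exact hne (congrArg Prod.fst this)
    have hlen := mm_ofList_ne_of_not_nodup hnotnodup
    simp only [PySem.Dict.size, PySem.Dict.values] at *
    rw [List.length_map] at hlen
    simp [hlen]

theorem mm_loop_eq : ∀ (pairs : List (Char × Char)) (b u : PySem.Dict String String),
    mmInv b u → b.keys.Nodup →
    (match mmLoopA pairs b with
     | none => ((false : Bool), ([] : List (String × String)))
     | some b2 => if (PySem.Set.ofList b2.values).length ≠ b2.size then (false, [])
                  else (true, b2.items)) = mmLoopB pairs b u := by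
  intro pairs
  induction pairs with
  | nil =>
    intro b u hinv hnd
    have hv := mm_values_nodup hinv hnd
    simp only [mmLoopA, mmLoopB]
    rw [PySem.Set.ofList_eq_self_of_nodup _ hv]
    simp [PySem.Dict.size, PySem.Dict.values]
  | cons p rest ih =>
    obtain ⟨digit, token⟩ := p
    intro b u hinv hnd
    simp only [mmLoopA, mmLoopB]
    by_cases hd : PySem.Chars.isdigit token = true
    · simp only [hd, if_true]
      by_cases heq : digit = token
      · simp only [heq, ite_true, ne_eq, not_true_eq_false, ite_false]
        exact ih b u hinv hnd
      · simp [heq]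
    · simp only [hd, Bool.false_eq_true, if_false]
      cases hb : b.get? (String.ofList [token]) with
      | some bound =>
        simp only
        by_cases hbd : bound = String.ofList [digit]
        · simp only [hbd, ite_true, ne_eq, not_true_eq_false, ite_false]
          exact ih b u hinv hnd
        · simp [hbd]
      | none =>
        simp only
        cases hu : u.get? (String.ofList [digit]) with
        | none =>
          -- fresh token, fresh digit: both insert
          refine ih _ _ ⟨?_, ?_⟩ (PySem.Dict.nodup_keys_insert _ _ _ hnd)
          · intro k v hk
            rw [PySem.Dict.get?_insert] at hk ⊢
            split at hk
            · rename_i hke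
              injection hk with hveq
              rw [if_pos hveq.symm, hke]
            · rename_i hkne
              have hv := hinv.1 _ _ hk
              have hvne : v ≠ String.ofList [digit] := by
                intro hve; rw [hve] at hv; rw [hv] at hu; cases hu
              rw [if_neg hvne]
              exact hv
          · intro v k hk
            rw [PySem.Dict.get?_insert] at hk ⊢
            split at hk
            · cases hk
              simp_all
            · rename_i hvne
              have hb' := hinv.2 _ _ hk
              have hkne : k ≠ String.ofList [token] := by
                intro hke; rw [hke] at hb'; rw [hb'] at hb; cases hb
              rw [if_neg hkne]
              exact hb'
        | some tk =>
          -- digit already used by tk: A carries the duplicate value to its final check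
          have hb' : b.get? tk = some (String.ofList [digit]) := hinv.2 _ _ hu
          have hne : (String.ofList [token]) ≠ tk := by
            intro he; rw [he] at hb; rw [hb'] at hb; cases hb
          refine mmLoopA_dup_false rest (PySem.Dict.nodup_keys_insert _ _ _ hnd)
            (String.ofList [token]) tk (String.ofList [digit]) hne ?_ ?_
          · rw [PySem.Dict.get?_insert_self]
          · rw [PySem.Dict.get?_insert_of_ne _ _ (fun h => hne h.symm)]
            exact hb'

-- ===== VERDICT (by name: the statement is the Claim_ definition above) =====
theorem match_mask_py_spec : Claim_equal_match_mask_py := by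
  intro mask number _
  unfold Spec_match_mask_py match_mask_py match_mask_py_alt
  by_cases hlen : PySem.Str.len mask ≠ PySem.Str.len number
  · rw [if_pos hlen, if_pos hlen]
  · rw [if_neg hlen, if_neg hlen]
    exact mm_loop_eq _ PySem.Dict.empty PySem.Dict.empty
      ⟨by intro k v h; simp [PySem.Dict.get?_empty] at h,
       by intro v k h; simp [PySem.Dict.get?_empty] at h⟩
      (by simp [PySem.Dict.keys_empty])
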